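-- pv_equiv track=rewrite | github.com/ASaltedF1sh/jianzhi_offer | MedianOfTwoSortedArrays.py | search_nearest
-- ===== SOURCE A (Python) =====
-- def search_nearest(arr, target, current):
--     arr = [x - target for x in arr]
--
--     if arr[0] >= 0:
--         return current
--     else:
--         l = 0
--         r = len(arr) - 1
--         best = 1
--         while l <= r:
--             mid = l + (r - l) // 2
--             if arr[mid] >= 0:
--                 r = mid -1
--             else:
--                 if best > 0:
--                     best = arr[mid]
--                 else:
--                     if arr[mid] > best:
--                         best = arr[mid]
--                 l = mid + 1
--
--         if target == current:
--             return min(current, best + target)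
--         else:
--             return max(current, best + target)
-- ===== SOURCE B (Python) =====
-- def _nearest_below(arr, target, l, r):
--     if l > r:
--         return None
--     mid = l + (r - l) // 2
--     if arr[mid] >= target:
--         return _nearest_below(arr, target, l, mid - 1)
--     right = _nearest_below(arr, target, mid + 1, r)
--     return arr[mid] if right is None else max(arr[mid], right)
--
-- def search_nearest(arr, target, current):
--     if arr[0] >= target:
--         return current
--     nearest = _nearest_below(arr, target, 0, len(arr) - 1)
--     if nearest is None:
--         return current
--     return min(current, nearest) if target == current else max(current, nearest)
-- ===== Notes on version B (the rewrite author's own statement) =====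
-- stated objective: faster
-- what changed: B binary-searches the original array directly with a recursive helper that returns the nearest value below target as an Optional (max-combining on the way back up), instead of first building a full target-shifted copy of the array and threading a sentinel accumulator (best=1) through a while loop.
import Mathlib
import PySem

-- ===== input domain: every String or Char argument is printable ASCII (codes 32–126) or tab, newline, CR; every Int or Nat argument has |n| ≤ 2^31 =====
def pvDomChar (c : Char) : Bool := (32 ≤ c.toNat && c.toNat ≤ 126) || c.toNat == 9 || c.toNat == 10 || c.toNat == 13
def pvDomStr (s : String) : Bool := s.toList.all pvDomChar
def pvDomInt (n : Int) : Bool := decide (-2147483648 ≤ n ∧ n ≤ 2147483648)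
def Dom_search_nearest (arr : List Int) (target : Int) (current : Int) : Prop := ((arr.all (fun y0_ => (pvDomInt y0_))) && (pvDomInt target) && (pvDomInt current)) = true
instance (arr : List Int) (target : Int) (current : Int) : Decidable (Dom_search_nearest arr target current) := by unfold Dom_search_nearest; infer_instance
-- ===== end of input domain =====

-- B binary-searches the original array directly with a recursive helper returning an Option,
-- instead of building an O(n) target-shifted copy and threading a sentinel accumulator through a while loop.

-- ===== PORT A =====
-- the while loop of A, state (l, r, best); arr2 is the shifted copy [x - target for x in arr].
-- fuel = size of the interval [l, r] at the call site (the loop shrinks it each iteration).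
def searchLoopA (arr2 : List Int) : Nat → Int → Int → Int → Int
  | 0, _, _, best => best
  | fuel + 1, l, r, best =>
    if l ≤ r then
      let mid := l + PySem.Int.floordiv (r - l) 2
      if PySem.List.pyGetD arr2 mid 0 ≥ 0 then
        searchLoopA arr2 fuel l (mid - 1) best
      else
        searchLoopA arr2 fuel (mid + 1) r
          (if best > 0 then PySem.List.pyGetD arr2 mid 0
           else if PySem.List.pyGetD arr2 mid 0 > best then PySem.List.pyGetD arr2 mid 0 else best)
    else best

-- arr[0] is arr2[0]: total pyGetD, exact under Pre_ (arr ≠ [], the only place Python A can raise)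
def search_nearest (arr : List Int) (target : Int) (current : Int) : Int :=
  let arr2 := arr.map (fun x => x - target)
  if PySem.List.pyGetD arr2 0 0 ≥ 0 then current
  else
    let best := searchLoopA arr2 arr2.length 0 (PySem.List.len arr2 - 1) 1
    if target = current then min current (best + target) else max current (best + target)

-- ===== PORT B =====
def nearestBelow (arr : List Int) (target : Int) : Nat → Int → Int → Option Int
  | 0, _, _ => none
  | fuel + 1, l, r =>
    if l ≤ r then
      let mid := l + PySem.Int.floordiv (r - l) 2
      if PySem.List.pyGetD arr mid 0 ≥ target then
        nearestBelow arr target fuel l (mid - 1)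
      else
        match nearestBelow arr target fuel (mid + 1) r with
        | none => some (PySem.List.pyGetD arr mid 0)
        | some w => some (max (PySem.List.pyGetD arr mid 0) w)
    else none

def search_nearest_alt (arr : List Int) (target : Int) (current : Int) : Int :=
  if PySem.List.pyGetD arr 0 0 ≥ target then current
  else
    match nearestBelow arr target arr.length 0 (PySem.List.len arr - 1) with
    | none => current
    | some w => if target = current then min current w else max current w

-- ===== PRECONDITION & SPEC =====
-- Pre_ excludes only the empty list, on which Python A raises IndexError (B raises too).
def Pre_search_nearest (arr : List Int) (target : Int) (current : Int) : Prop := arr ≠ []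
instance (arr : List Int) (target : Int) (current : Int) : Decidable (Pre_search_nearest arr target current) := by unfold Pre_search_nearest; infer_instance
def pvWitness_search_nearest : List Int × Int × Int := ([1, 3, 5], 4, 4)

def Spec_search_nearest (arr : List Int) (target : Int) (current : Int) (out : Int) : Prop := out = search_nearest_alt arr target current
instance (arr : List Int) (target : Int) (current : Int) (out : Int) : Decidable (Spec_search_nearest arr target current out) := by unfold Spec_search_nearest; infer_instance

-- ===== CLAIM (what is proved, stated in full; the proofs are below) =====
def Claim_equal_search_nearest : Prop := ∀ (arr : List Int) (target : Int) (current : Int), Dom_search_nearest arr target current → Pre_search_nearest arr target current → Spec_search_nearest arr target current (search_nearest arr target current)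

-- ===== LEMMAS AND PROOFS =====

-- indexing the shifted copy in range
lemma pyGetD_map_sub (arr : List Int) (target i : Int) (h0 : 0 ≤ i) (h1 : i < arr.length) :
    PySem.List.pyGetD (arr.map (fun x => x - target)) i 0 = PySem.List.pyGetD arr i 0 - target := by
  rw [PySem.List.pyGetD_eq_getElem _ 0 h0 (by simpa using h1),
      PySem.List.pyGetD_eq_getElem _ 0 h0 h1, List.getElem_map]

-- A's loop over the shifted copy computes B's recursion, combined with the sentinel accumulator
lemma loop_eq_nearest (arr : List Int) (target : Int) :
    ∀ (n : Nat) (l r best : Int), (r + 1 - l).toNat ≤ n → 0 ≤ l → r < arr.length →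
      searchLoopA (arr.map (fun x => x - target)) n l r best =
        (match nearestBelow arr target n l r with
         | none => best
         | some w => if best > 0 then w - target else max best (w - target)) := by
  intro n
  induction n with
  | zero =>
    intro l r best _ _ _
    simp [searchLoopA, nearestBelow]
  | succ n ih =>
    intro l r best hn h0 hr
    by_cases hlr : l ≤ r
    · rw [searchLoopA, nearestBelow]
      have hdiv : PySem.Int.floordiv (r - l) 2 = (r - l) / 2 :=
        PySem.Int.floordiv_eq_ediv_of_pos (by norm_num)
      simp only [hlr, dif_pos, hdiv]
      generalize hmid : l + (r - l) / 2 = mid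
      have hmb : l ≤ mid ∧ mid ≤ r := by omega
      have hv := pyGetD_map_sub arr target mid (by omega) (by omega)
      by_cases hge : PySem.List.pyGetD arr mid 0 ≥ target
      · have : PySem.List.pyGetD (arr.map (fun x => x - target)) mid 0 ≥ 0 := by omega
        simp only [this, if_pos, hge]
        exact ih l (mid - 1) best (by omega) h0 (by omega)
      · have hneg : ¬ PySem.List.pyGetD (arr.map (fun x => x - target)) mid 0 ≥ 0 := by omega
        simp only [hneg, hge, if_false]
        rw [ih (mid + 1) r _ (by omega) (by omega) hr, hv]
        rcases hrec : nearestBelow arr target n (mid + 1) r with _ | w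
        · simp [max_def]
          split_ifs <;> first | omega | linarith
        · simp [max_def]
          split_ifs <;> first | omega | linarith
    · rw [searchLoopA, nearestBelow]
      simp [hlr]

-- when the left endpoint is strictly below target, B's recursion finds something
lemma nearest_isSome (arr : List Int) (target : Int) :
    ∀ (n : Nat) (l r : Int), (r + 1 - l).toNat ≤ n → 0 ≤ l → l ≤ r → r < arr.length →
      PySem.List.pyGetD arr l 0 < target → (nearestBelow arr target n l r).isSome := by
  intro n
  induction n with
  | zero => intro l r hn h0 hlr; omega
  | succ n ih =>
    intro l r hn h0 hlr hr hbelow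
    rw [nearestBelow]
    simp only [hlr, dif_pos]
    have hdiv : PySem.Int.floordiv (r - l) 2 = (r - l) / 2 :=
      PySem.Int.floordiv_eq_ediv_of_pos (by norm_num)
    set mid := l + PySem.Int.floordiv (r - l) 2 with hmid
    have hmb : l ≤ mid ∧ mid ≤ r := by rw [hmid, hdiv]; omega
    by_cases hge : PySem.List.pyGetD arr mid 0 ≥ target
    · have hne : mid ≠ l := by intro he; rw [he] at hge; omega
      simp only [hge, if_pos]
      exact ih l (mid - 1) (by omega) h0 (by omega) (by omega) hbelow
    · simp only [hge, if_false]
      rcases nearestBelow arr target n (mid + 1) r with _ | w <;> simp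

-- ===== VERDICT (by name: the statement is the Claim_ definition above) =====
theorem search_nearest_spec : Claim_equal_search_nearest := by
  intro arr target current _ hpre
  unfold Spec_search_nearest search_nearest search_nearest_alt
  have hlen : 0 < arr.length := List.length_pos_iff.mpr hpre
  have h0 := pyGetD_map_sub arr target 0 le_rfl (by exact_mod_cast hlen)
  by_cases hge : PySem.List.pyGetD arr 0 0 ≥ target
  · have : PySem.List.pyGetD (arr.map (fun x => x - target)) 0 0 ≥ 0 := by omega
    simp [this, hge]
  · have hneg : ¬ PySem.List.pyGetD (arr.map (fun x => x - target)) 0 0 ≥ 0 := by omega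
    simp only [hneg, hge, if_false, PySem.List.len_eq, List.length_map]
    have hL := loop_eq_nearest arr target arr.length 0
      ((arr.length : Int) - 1) 1 (by omega) le_rfl (by omega)
    have hS := nearest_isSome arr target arr.length 0
      ((arr.length : Int) - 1) (by omega) le_rfl (by omega) (by omega) (by omega)
    rcases hrec : nearestBelow arr target arr.length 0 ((arr.length : Int) - 1) with _ | w
    · rw [hrec] at hS; simp at hS
    · rw [hrec] at hL
      simp only [if_pos (by norm_num : (1:Int) > 0)] at hL
      rw [hL, sub_add_cancel]
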